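-- pv_equiv track=rewrite | github.com/Alfthrpy/Docx-Converter | utils/function.py | parse_paired_data_row
-- ===== SOURCE A (Python) =====
-- PAIR_KEYS = ['maks', 'min', 'rata-rata']
--
-- def parse_paired_data_row(row):
--     """Mem-parsing satu baris yang berisi beberapa pasangan key-value."""
--     paired_data = {}
--     cells = list(row)
--     for i in range(len(cells)):
--         key = cells[i].strip().lower().replace('.', '')
--         if key in PAIR_KEYS:
--             for j in range(i + 1, len(cells)):
--                 value = cells[j].strip()
--                 if value and value not in PAIR_KEYS:
--                     paired_data[key] = value
--                     break
--     return paired_data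
-- ===== SOURCE B (Python) =====
-- PAIR_KEYS = ['maks', 'min', 'rata-rata']
--
-- def parse_paired_data_row(row):
--     """One forward pass: keys wait in `pending` until the next value cell."""
--     paired_data = {}
--     pending = []
--     for cell in row:
--         stripped = cell.strip()
--         if stripped and stripped not in PAIR_KEYS:
--             for key in pending:
--                 paired_data[key] = stripped
--             pending = []
--         norm = stripped.lower().replace('.', '')
--         if norm in PAIR_KEYS:
--             pending.append(norm)
--     return paired_data
-- ===== Notes on version B (the rewrite author's own statement) =====
-- stated objective: alternative
-- what changed: Replaced A's nested scans (for every key cell, rescan the remainder of the row for its first usable value) by a single forward pass that keeps normalised keys in a `pending` list and assigns them all when the next value cell arrives; it trades the rescans for per-cell normalisation work.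
import Mathlib
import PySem

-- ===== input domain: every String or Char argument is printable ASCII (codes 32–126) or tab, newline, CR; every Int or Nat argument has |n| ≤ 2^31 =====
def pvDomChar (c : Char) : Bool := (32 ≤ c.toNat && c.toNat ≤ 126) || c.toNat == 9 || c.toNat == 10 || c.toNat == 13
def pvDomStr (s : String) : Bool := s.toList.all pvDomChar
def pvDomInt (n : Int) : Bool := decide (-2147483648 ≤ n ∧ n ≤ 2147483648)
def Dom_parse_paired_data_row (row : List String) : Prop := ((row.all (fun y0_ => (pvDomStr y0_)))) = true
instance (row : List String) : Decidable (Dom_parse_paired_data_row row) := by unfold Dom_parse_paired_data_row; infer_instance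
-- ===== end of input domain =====

-- B replaces A's nested scans (for each key cell, rescan the rest of the row for its value)
-- by a single forward pass that keeps the keys still awaiting a value in a `pending` list.

def PAIR_KEYS : List String := ["maks", "min", "rata-rata"]

-- ===== PORT A =====
-- inner loop 'for j in range(i+1, len(cells)): … break' (the dict is only written once, at the break)
def pvInnerA (cells : List String) (key : String) (d : PySem.Dict String String) :
    List Int → PySem.Dict String String
  | [] => d
  | j :: js =>
    let value := PySem.Str.strip (PySem.List.pyGetD cells j "")
    if value ≠ "" ∧ value ∉ PAIR_KEYS then d.insert key value
    else pvInnerA cells key d js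

-- outer loop 'for i in range(len(cells))'
def pvOuterA (cells : List String) : List Int → PySem.Dict String String → PySem.Dict String String
  | [], d => d
  | i :: is, d =>
    let key := PySem.Str.replace (PySem.Str.lower (PySem.Str.strip (PySem.List.pyGetD cells i ""))) "." ""
    let d' := if key ∈ PAIR_KEYS then
        pvInnerA cells key d (PySem.List.pyRange (i + 1) (cells.length : Int) 1)
      else d
    pvOuterA cells is d'

def parse_paired_data_row (row : List String) : List (String × String) :=
  let cells := row
  (pvOuterA cells (PySem.List.pyRange 0 (cells.length : Int) 1) PySem.Dict.empty).items

-- ===== PORT B =====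
-- one step of B's single forward pass: first treat the cell as a value, then as a key
def pvStepB (st : PySem.Dict String String × List String) (cell : String) :
    PySem.Dict String String × List String :=
  let stripped := PySem.Str.strip cell
  let st1 := if stripped ≠ "" ∧ stripped ∉ PAIR_KEYS then
      (st.2.foldl (fun d k => d.insert k stripped) st.1, ([] : List String))
    else st
  let norm := PySem.Str.replace (PySem.Str.lower stripped) "." ""
  if norm ∈ PAIR_KEYS then (st1.1, st1.2 ++ [norm]) else st1

def parse_paired_data_row_alt (row : List String) : List (String × String) :=
  (row.foldl pvStepB (PySem.Dict.empty, [])).1.items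

-- ===== PRECONDITION & SPEC =====
def Spec_parse_paired_data_row (row : List String) (out : List (String × String)) : Prop := out = parse_paired_data_row_alt row
instance (row : List String) (out : List (String × String)) : Decidable (Spec_parse_paired_data_row row out) := by unfold Spec_parse_paired_data_row; infer_instance

-- ===== CLAIM (what is proved, stated in full; the proofs are below) =====
def Claim_equal_parse_paired_data_row : Prop := ∀ (row : List String), Dom_parse_paired_data_row row → Spec_parse_paired_data_row row (parse_paired_data_row row)

-- ===== LEMMAS AND PROOFS =====

-- normalised key of a cell
def pvNorm (c : String) : String := PySem.Str.replace (PySem.Str.lower (PySem.Str.strip c)) "." ""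

theorem pvNorm_def (c : String) :
    PySem.Str.replace (PySem.Str.lower (PySem.Str.strip c)) "." "" = pvNorm c := rfl

-- first usable value in a suffix of the row
def pvFv : List String → Option String
  | [] => none
  | c :: rest =>
    if PySem.Str.strip c ≠ "" ∧ PySem.Str.strip c ∉ PAIR_KEYS then some (PySem.Str.strip c)
    else pvFv rest

-- assign a (possible) value to every pending key
def pvIns (d : PySem.Dict String String) (pending : List String) :
    Option String → PySem.Dict String String
  | some v => pending.foldl (fun d k => d.insert k v) d
  | none => d

-- common structural form: resolve the head cell against the first value of the rest
def pvGo (d : PySem.Dict String String) : List String → PySem.Dict String String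
  | [] => d
  | c :: rest =>
    pvGo (if pvNorm c ∈ PAIR_KEYS then
            (match pvFv rest with
             | some v => d.insert (pvNorm c) v
             | none => d)
          else d) rest

theorem pvInnerA_eq (cells : List String) (key : String) (d : PySem.Dict String String) :
    ∀ i : Nat, i ≤ cells.length →
      pvInnerA cells key d (PySem.List.pyRange (i : Int) (cells.length : Int) 1)
        = pvIns d [key] (pvFv (cells.drop i)) := by
  intro i hi
  induction hn : cells.length - i generalizing i with
  | zero =>
    have : i = cells.length := by omega
    subst this
    rw [PySem.List.pyRange_one_eq_nil (by omega)]
    simp [pvInnerA, pvFv, pvIns]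
  | succ n ih =>
    have hlt : i < cells.length := by omega
    rw [PySem.List.pyRange_one_cons (by exact_mod_cast hlt)]
    have hdrop : cells.drop i = cells[i] :: cells.drop (i + 1) :=
      (List.getElem_cons_drop hlt).symm
    have hget : PySem.List.pyGetD cells (i : Int) "" = cells[i] := by
      rw [PySem.List.pyGetD_natCast, List.getD_eq_getElem cells "" hlt]
    simp only [pvInnerA, hget, hdrop, pvFv]
    split_ifs with h
    · simp [pvIns]
    · have := ih (i + 1) (by omega) (by omega)
      rw [show ((i : Int) + 1) = ((i + 1 : Nat) : Int) by push_cast; ring]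
      exact this

theorem pvOuterA_eq (cells : List String) :
    ∀ i : Nat, i ≤ cells.length → ∀ d,
      pvOuterA cells (PySem.List.pyRange (i : Int) (cells.length : Int) 1) d
        = pvGo d (cells.drop i) := by
  intro i hi
  induction hn : cells.length - i generalizing i with
  | zero =>
    intro d
    have : i = cells.length := by omega
    subst this
    rw [PySem.List.pyRange_one_eq_nil (by omega)]
    simp [pvOuterA, pvGo]
  | succ n ih =>
    intro d
    have hlt : i < cells.length := by omega
    rw [PySem.List.pyRange_one_cons (by exact_mod_cast hlt)]
    have hdrop : cells.drop i = cells[i] :: cells.drop (i + 1) :=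
      (List.getElem_cons_drop hlt).symm
    have hget : PySem.List.pyGetD cells (i : Int) "" = cells[i] := by
      rw [PySem.List.pyGetD_natCast, List.getD_eq_getElem cells "" hlt]
    have hcast : ((i : Int) + 1) = ((i + 1 : Nat) : Int) := by push_cast; ring
    have hinner := pvInnerA_eq cells (pvNorm cells[i]) d (i + 1) (by omega)
    have hih := ih (i + 1) (by omega) (by omega)
    simp only [pvOuterA, hget, hdrop, pvGo, pvNorm_def]
    split_ifs with h
    · rw [hcast, hinner, hih]
      cases pvFv (cells.drop (i + 1)) <;> simp [pvIns]
    · rw [hcast]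
      exact hih d

theorem pvFoldB_eq (s : List String) :
    ∀ (d : PySem.Dict String String) (pending : List String),
      (s.foldl pvStepB (d, pending)).1 = pvGo (pvIns d pending (pvFv s)) s := by
  induction s with
  | nil => intro d pending; simp [pvFv, pvIns, pvGo]
  | cons c rest ih =>
    intro d pending
    simp only [List.foldl_cons, pvStepB, pvFv, pvGo, pvNorm_def]
    split_ifs <;> rw [ih] <;>
      (cases pvFv rest <;> simp [pvIns])

-- ===== VERDICT (by name: the statement is the Claim_ definition above) =====
theorem parse_paired_data_row_spec : Claim_equal_parse_paired_data_row := by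
  intro row _
  unfold Spec_parse_paired_data_row parse_paired_data_row parse_paired_data_row_alt
  rw [pvFoldB_eq row PySem.Dict.empty []]
  have h0 := pvOuterA_eq row 0 (Nat.zero_le _) PySem.Dict.empty
  simp only [Nat.cast_zero, List.drop_zero] at h0
  show (pvOuterA row (PySem.List.pyRange 0 (row.length : Int) 1) PySem.Dict.empty).items = _
  rw [h0]
  cases pvFv row <;> simp [pvIns]
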